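-- pv_equiv track=rewrite | github.com/541741106/IMPACT_HOI | tools/boundary_eval.py | _boundaries_from_frame_labels
-- ===== SOURCE A (Python) =====
-- from typing import Any, Dict, Iterable, List, Optional, Tuple
--
-- def _boundaries_from_frame_labels(labels: List[Any]) -> List[int]:
--     if not labels:
--         return []
--     b = []
--     prev = labels[0]
--     for i in range(1, len(labels)):
--         if labels[i] != prev:
--             b.append(i)
--             prev = labels[i]
--     return b
-- ===== SOURCE B (Python) =====
-- from itertools import groupby
--
-- def _boundaries_from_frame_labels(labels):
--     out = []
--     idx = 0
--     for _key, grp in groupby(labels):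
--         idx += sum(1 for _ in grp)
--         out.append(idx)
--     return out[:-1]
-- ===== Notes on version B (the rewrite author's own statement) =====
-- stated objective: idiomatic
-- what changed: B iterates over maximal runs of equal labels with itertools.groupby, accumulating cumulative run lengths and dropping the final one, instead of A's index loop tracking a prev variable.
import Mathlib
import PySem

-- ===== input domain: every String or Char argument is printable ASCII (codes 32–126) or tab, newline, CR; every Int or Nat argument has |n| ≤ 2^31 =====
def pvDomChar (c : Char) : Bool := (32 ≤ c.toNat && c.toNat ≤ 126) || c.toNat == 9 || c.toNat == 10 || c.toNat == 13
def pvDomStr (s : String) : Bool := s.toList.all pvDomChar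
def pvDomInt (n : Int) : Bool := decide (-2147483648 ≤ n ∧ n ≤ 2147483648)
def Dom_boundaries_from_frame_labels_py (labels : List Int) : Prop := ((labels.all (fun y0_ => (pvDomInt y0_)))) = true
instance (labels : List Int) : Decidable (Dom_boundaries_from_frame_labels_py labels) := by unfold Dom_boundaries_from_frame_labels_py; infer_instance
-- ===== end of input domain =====

-- B rewrites A's prev-tracking index loop as an iteration over maximal runs of equal
-- labels (itertools.groupby): cumulative run lengths, with the final one dropped (idiomatic).

-- ===== PORT A =====
-- literal port of A: early return on empty, then a loop over range(1, len(labels))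
-- with state (b, prev), appending the index i when labels[i] != prev.
def boundaries_from_frame_labels_py (labels : List Int) : List Int :=
  match labels with
  | [] => []
  | l0 :: _ =>
    (((PySem.List.pyRange 1 (labels.length : Int) 1).foldl
      (fun (st : List Int × Int) i =>
        if PySem.List.pyGetD labels i 0 ≠ st.2 then
          (st.1 ++ [i], PySem.List.pyGetD labels i 0)
        else st)
      ([], l0))).1

-- ===== PORT B =====
-- hand port of itertools.groupby on a list of Ints: pvRunSplit x xs = (length of the
-- maximal run of x at the head of (x :: xs), remainder); pvGroupLens = list of group lengths.
def pvRunSplit (x : Int) : List Int → Int × List Int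
  | [] => (1, [])
  | y :: ys =>
    if y = x then
      let p := pvRunSplit x ys
      (p.1 + 1, p.2)
    else (1, y :: ys)

theorem pvRunSplit_len (x : Int) (xs : List Int) : (pvRunSplit x xs).2.length ≤ xs.length := by
  induction xs with
  | nil => simp [pvRunSplit]
  | cons y ys ih =>
    simp only [pvRunSplit]
    split
    · exact le_trans ih (by simp)
    · simp

def pvGroupLens : List Int → List Int
  | [] => []
  | x :: xs =>
    (pvRunSplit x xs).1 :: pvGroupLens (pvRunSplit x xs).2
termination_by l => l.length
decreasing_by
  have := pvRunSplit_len x xs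
  simp only [List.length_cons]
  omega

-- port of B: running index idx, append idx after each group, return out[:-1]
def boundaries_from_frame_labels_py_alt (labels : List Int) : List Int :=
  let st := (pvGroupLens labels).foldl
    (fun (st : List Int × Int) n => (st.1 ++ [st.2 + n], st.2 + n)) ([], 0)
  PySem.List.slice st.1 none (some (-1))

-- ===== PRECONDITION & SPEC =====
def Spec_boundaries_from_frame_labels_py (labels : List Int) (out : List Int) : Prop := out = boundaries_from_frame_labels_py_alt labels
instance (labels : List Int) (out : List Int) : Decidable (Spec_boundaries_from_frame_labels_py labels out) := by unfold Spec_boundaries_from_frame_labels_py; infer_instance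

-- ===== CLAIM (what is proved, stated in full; the proofs are below) =====
def Claim_equal_boundaries_from_frame_labels_py : Prop := ∀ (labels : List Int), Dom_boundaries_from_frame_labels_py labels → Spec_boundaries_from_frame_labels_py labels (boundaries_from_frame_labels_py labels)

-- ===== LEMMAS AND PROOFS =====

-- reference recursion: boundaries of (prev followed by xs), indices starting at i
def pvBdry (prev : Int) (i : Int) : List Int → List Int
  | [] => []
  | x :: xs => if x ≠ prev then i :: pvBdry x (i + 1) xs else pvBdry prev (i + 1) xs

-- partial sums starting from c
def pvPsums (c : Int) : List Int → List Int
  | [] => []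
  | n :: ns => (c + n) :: pvPsums (c + n) ns

theorem pvPsums_ne_nil (c : Int) (n : Int) (ns : List Int) : pvPsums c (n :: ns) ≠ [] := by
  simp [pvPsums]

theorem foldl_psums (ns : List Int) (acc : List Int) (c : Int) :
    ((ns.foldl (fun (st : List Int × Int) n => (st.1 ++ [st.2 + n], st.2 + n)) (acc, c))).1
      = acc ++ pvPsums c ns := by
  induction ns generalizing acc c with
  | nil => simp [pvPsums]
  | cons n ns ih =>
    simp only [List.foldl_cons, pvPsums, ih, List.append_assoc, List.singleton_append]

-- B equals the reference recursion
theorem pvG (xs : List Int) (x : Int) (i : Int) :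
    (pvPsums i (pvGroupLens (x :: xs))).dropLast = pvBdry x (i + 1) xs := by
  induction xs generalizing x i with
  | nil =>
    rw [pvGroupLens]
    simp [pvRunSplit, pvGroupLens, pvPsums, pvBdry]
  | cons y ys ih =>
    by_cases hxy : y = x
    · subst hxy
      rw [pvGroupLens]
      simp only [pvRunSplit]
      simp only [if_true]
      have hsh : pvPsums i (((pvRunSplit y ys).1 + 1) :: pvGroupLens (pvRunSplit y ys).2)
          = pvPsums (i + 1) ((pvRunSplit y ys).1 :: pvGroupLens (pvRunSplit y ys).2) := by
        have harith : i + ((pvRunSplit y ys).1 + 1) = i + 1 + (pvRunSplit y ys).1 := by ring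
        simp only [pvPsums, harith]
      rw [hsh]
      have := ih y (i + 1)
      rw [pvGroupLens] at this
      rw [this]
      simp [pvBdry]
    · rw [pvGroupLens]
      simp only [pvRunSplit]
      rw [if_neg hxy]
      simp only [pvPsums]
      have hne : pvPsums (i + 1) (pvGroupLens (y :: ys)) ≠ [] := by
        rw [pvGroupLens]
        exact pvPsums_ne_nil _ _ _
      rw [List.dropLast_cons_of_ne_nil hne]
      rw [ih y (i + 1)]
      simp [pvBdry, hxy]

theorem alt_eq_bdry (l0 : Int) (rest : List Int) :
    boundaries_from_frame_labels_py_alt (l0 :: rest) = pvBdry l0 1 rest := by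
  unfold boundaries_from_frame_labels_py_alt
  rw [PySem.List.slice_to_neg_one]
  rw [foldl_psums]
  simpa using pvG rest l0 0

-- A's loop equals the reference recursion
theorem loopA (rest : List Int) (labels : List Int) (a : Nat)
    (hd : labels.drop a = rest) (acc : List Int) (prev : Int) :
    ((PySem.List.pyRange (a : Int) (labels.length : Int) 1).foldl
      (fun (st : List Int × Int) i =>
        if PySem.List.pyGetD labels i 0 ≠ st.2 then
          (st.1 ++ [i], PySem.List.pyGetD labels i 0)
        else st) (acc, prev)).1
      = acc ++ pvBdry prev (a : Int) rest := by
  induction rest generalizing a acc prev with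
  | nil =>
    have hlen : labels.length ≤ a := by
      have := congrArg List.length hd
      simp [List.length_drop] at this
      omega
    rw [PySem.List.pyRange_one_eq_nil (by exact_mod_cast hlen)]
    simp [pvBdry]
  | cons x xs ih =>
    have hlt : a < labels.length := by
      have := congrArg List.length hd
      simp [List.length_drop] at this
      omega
    have hget : labels[a]'hlt = x := by
      have : labels.drop a = labels[a]'hlt :: labels.drop (a + 1) := List.drop_eq_getElem_cons hlt
      rw [hd] at this
      exact (List.cons.injEq _ _ _ _ ▸ this).1.symm
    have hdrop : labels.drop (a + 1) = xs := by
      have : labels.drop a = labels[a]'hlt :: labels.drop (a + 1) := List.drop_eq_getElem_cons hlt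
      rw [hd] at this
      exact (List.cons.injEq _ _ _ _ ▸ this).2.symm
    rw [PySem.List.pyRange_one_cons (by exact_mod_cast hlt)]
    simp only [List.foldl_cons]
    have hgd : PySem.List.pyGetD labels (a : Int) 0 = x := by
      rw [PySem.List.pyGetD_natCast]
      simp [List.getD, List.getElem?_eq_getElem hlt, hget]
    rw [hgd]
    by_cases hx : x ≠ prev
    · rw [if_pos hx]
      have : ((a : Int) + 1) = ((a + 1 : Nat) : Int) := by push_cast; ring
      rw [this, ih (a + 1) hdrop (acc ++ [(a : Int)]) x]
      simp [pvBdry, hx]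
    · rw [if_neg hx]
      have : ((a : Int) + 1) = ((a + 1 : Nat) : Int) := by push_cast; ring
      rw [this, ih (a + 1) hdrop acc prev]
      simp only [pvBdry]
      rw [if_neg hx]
      congr 1

theorem a_eq_bdry (l0 : Int) (rest : List Int) :
    boundaries_from_frame_labels_py (l0 :: rest) = pvBdry l0 1 rest := by
  unfold boundaries_from_frame_labels_py
  have := loopA rest (l0 :: rest) 1 (by simp) [] l0
  simpa using this

-- ===== VERDICT (by name: the statement is the Claim_ definition above) =====
theorem boundaries_from_frame_labels_py_spec : Claim_equal_boundaries_from_frame_labels_py := by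
  intro labels _
  unfold Spec_boundaries_from_frame_labels_py
  cases labels with
  | nil =>
    simp [boundaries_from_frame_labels_py, boundaries_from_frame_labels_py_alt, pvGroupLens,
      PySem.List.slice_to_neg_one]
  | cons l0 rest => rw [a_eq_bdry, alt_eq_bdry]
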